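-- pv_equiv track=rewrite | github.com/mahmoodlab/TRIDENT | trident/Summary.py | _render_counts
-- ===== SOURCE A (Python) =====
-- from typing import Any, Dict, Optional, Tuple
--
-- def _render_counts(counts: Dict[str, int]) -> str:
--     # Stable ordering: completed/skipped/error/running/not_started/unknown then alpha for the rest.
--     preferred = [
--         "completed",
--         "skipped",
--         "error",
--         "running",
--         "not_started",
--         "unknown",
--     ]
--
--     def key(k: str) -> Tuple[int, str]:
--         base = k.split(" ", 1)[0]
--         try:
--             return (preferred.index(base), k)
--         except ValueError:
--             return (len(preferred), k)
--
--     parts = [f"{k}: {counts[k]}" for k in sorted(counts.keys(), key=key)]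
--     return ", ".join(parts) if parts else "no recorded tasks"
-- ===== SOURCE B (Python) =====
-- def _render_counts(counts):
--     preferred = [
--         "completed",
--         "skipped",
--         "error",
--         "running",
--         "not_started",
--         "unknown",
--     ]
--
--     def base(k):
--         return k.split(" ", 1)[0]
--
--     def fmt(k):
--         return f"{k}: {counts[k]}"
--
--     parts = []
--     for p in preferred:
--         parts.extend(fmt(k) for k in sorted(k for k in counts if base(k) == p))
--     parts.extend(fmt(k) for k in sorted(k for k in counts if base(k) not in preferred))
--     return ", ".join(parts) if parts else "no recorded tasks"
-- ===== Notes on version B (the rewrite author's own statement) =====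
-- stated objective: alternative
-- what changed: Replaces the single composite-key (rank, key) sort with bucketing: one sorted bucket per preferred base in preferred order, then the sorted non-preferred remainder, concatenated.
import Mathlib
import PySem

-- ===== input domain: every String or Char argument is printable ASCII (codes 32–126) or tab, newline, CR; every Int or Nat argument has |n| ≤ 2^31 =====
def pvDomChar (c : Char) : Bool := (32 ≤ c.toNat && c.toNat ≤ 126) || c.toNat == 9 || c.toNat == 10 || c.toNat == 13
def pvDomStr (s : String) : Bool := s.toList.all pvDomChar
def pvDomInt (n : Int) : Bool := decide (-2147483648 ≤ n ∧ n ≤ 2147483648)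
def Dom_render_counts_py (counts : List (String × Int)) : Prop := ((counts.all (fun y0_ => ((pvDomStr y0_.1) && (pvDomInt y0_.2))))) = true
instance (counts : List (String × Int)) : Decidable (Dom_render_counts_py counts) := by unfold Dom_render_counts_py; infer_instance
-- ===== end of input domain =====

-- B replaces A's single composite-key (rank, key) sort by per-preferred-base buckets
-- (each sorted by key) followed by the sorted non-preferred remainder: an alternative
-- decomposition of the same ordering, not claimed faster.

-- shared helpers (both Pythons contain the same `preferred` literal and the same base/format expressions)
def pvPreferred : List String :=
  ["completed", "skipped", "error", "running", "not_started", "unknown"]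

-- k.split(" ", 1)[0]; the split list is always nonempty and the separator nonempty, so the fallbacks are dead
def pvBase (k : String) : String :=
  match PySem.Str.splitMax? k " " 1 with
  | some (b :: _) => b
  | _ => ""

-- f"{k}: {counts[k]}" (k is always a key of d, so getD's default is dead)
def pvFmt (d : PySem.Dict String Int) (k : String) : String :=
  PySem.Str.join "" [k, ": ", PySem.Int.toStr (d.getD k 0)]

-- ===== PORT A =====
-- key(k) = (preferred.index(base), k) with the try/except ValueError fallback (len(preferred), k), via index?
def pvRank (k : String) : Int :=
  match PySem.List.index? pvPreferred (pvBase k) with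
  | some i => (i : Int)
  | none => (pvPreferred.length : Int)

def render_counts_py (counts : List (String × Int)) : String :=
  let d := PySem.Dict.ofList counts
  let parts := (PySem.List.sorted2 d.keys pvRank (fun k => k)).map (pvFmt d)
  if parts.isEmpty then "no recorded tasks" else PySem.Str.join ", " parts

-- ===== PORT B =====
def render_counts_py_alt (counts : List (String × Int)) : String :=
  let d := PySem.Dict.ofList counts
  let ks := d.keys
  let parts :=
    pvPreferred.foldl
      (fun acc p =>
        acc ++ (PySem.List.sorted (ks.filter (fun k => pvBase k == p)) (fun k => k)).map (pvFmt d))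
      []
    ++ (PySem.List.sorted (ks.filter (fun k => !(pvPreferred.contains (pvBase k)))) (fun k => k)).map (pvFmt d)
  if parts.isEmpty then "no recorded tasks" else PySem.Str.join ", " parts

-- ===== PRECONDITION & SPEC =====
def Spec_render_counts_py (counts : List (String × Int)) (out : String) : Prop := out = render_counts_py_alt counts
instance (counts : List (String × Int)) (out : String) : Decidable (Spec_render_counts_py counts out) := by unfold Spec_render_counts_py; infer_instance

-- ===== CLAIM (what is proved, stated in full; the proofs are below) =====
def Claim_equal_render_counts_py : Prop := ∀ (counts : List (String × Int)), Dom_render_counts_py counts → Spec_render_counts_py counts (render_counts_py counts)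

-- ===== LEMMAS AND PROOFS =====

-- A's composite sort key, packaged as a single lexicographic key
def pvLexKey (k : String) : Int ×ₗ String := toLex (pvRank k, k)

theorem pv_sorted2_eq_sorted_lex (xs : List String) :
    PySem.List.sorted2 xs pvRank (fun k => k) = PySem.List.sorted xs pvLexKey := by
  simp only [PySem.List.sorted2, PySem.List.sorted]
  congr 1
  funext acc x
  congr 1
  funext a b
  by_cases h1 : pvRank a < pvRank b <;> by_cases h2 : pvRank b < pvRank a <;>
    by_cases h3 : a < b <;>
    simp [pvLexKey, Prod.Lex.lt_iff, h1, h2, h3] <;> omega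

theorem pvLex_of_rank_lt {a b : String} (h : pvRank a < pvRank b) : pvLexKey a < pvLexKey b := by
  simp only [pvLexKey, Prod.Lex.lt_iff, ofLex_toLex]; exact Or.inl h

theorem pvLex_of_rank_eq {a b : String} (h : pvRank a = pvRank b) (h2 : a < b) :
    pvLexKey a < pvLexKey b := by
  simp only [pvLexKey, Prod.Lex.lt_iff, ofLex_toLex]; exact Or.inr ⟨h, h2⟩

theorem pvRank_of_idx {k p : String} {j : Nat} (h : pvBase k = p)
    (hidx : PySem.List.index? pvPreferred p = some j) : pvRank k = (j : Int) := by
  have hidx' : List.idxOf? p pvPreferred = some j := by simpa using hidx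
  simp [pvRank, h, hidx']

theorem pvRank_of_not_contains {k : String} (h : pvPreferred.contains (pvBase k) = false) :
    pvRank k = 6 := by
  have h0 : PySem.List.index? pvPreferred (pvBase k) = none := by
    rw [PySem.List.index?_eq_none_iff]
    simpa using h
  have h0' : List.idxOf? (pvBase k) pvPreferred = none := by simpa using h0
  simp [pvRank, h0']
  rfl

theorem mem_seg {ks : List String} {q : String → Bool} {k : String}
    (h : k ∈ PySem.List.sorted (ks.filter q) (fun x => x)) : q k = true :=
  (List.mem_filter.mp ((PySem.List.mem_sorted _ _ _ _).mp h)).2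

theorem seg_pairwise {ks : List String} (hnd : ks.Nodup) (q : String → Bool) :
    (PySem.List.sorted (ks.filter q) (fun x => x)).Pairwise (fun a b : String => a < b) := by
  have h1 := PySem.List.sorted_pairwise (ks.filter q) (fun x : String => x)
  have h2 : (PySem.List.sorted (ks.filter q) (fun x : String => x)).Nodup :=
    ((PySem.List.sorted_perm (ks.filter q) (fun x : String => x) false).nodup_iff).mpr (hnd.filter q)
  exact (h1.and h2).imp (fun h => lt_of_le_of_ne h.1 h.2)

-- B's key list: one sorted bucket per preferred base, then the sorted remainder
def pvBuckets (P : List String) (ks : List String) : List String :=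
  P.flatMap (fun p => PySem.List.sorted (ks.filter (fun k => pvBase k == p)) (fun k => k))

def pvRest (ks : List String) : List String :=
  PySem.List.sorted (ks.filter (fun k => !(pvPreferred.contains (pvBase k)))) (fun k => k)

theorem tail_pairwise (ks : List String) (hnd : ks.Nodup) :
    ∀ (s : List String) (j : Nat),
      (∀ i (h : i < s.length), PySem.List.index? pvPreferred s[i] = some (j + i)) →
      j + s.length ≤ 6 →
        List.Pairwise (fun a b => pvLexKey a < pvLexKey b) (pvBuckets s ks ++ pvRest ks)
          ∧ ∀ k ∈ pvBuckets s ks ++ pvRest ks, (j : Int) ≤ pvRank k := by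
  intro s
  induction s with
  | nil =>
    intro j _ hle
    have hrest : ∀ k ∈ pvRest ks, pvRank k = 6 := by
      intro k hk
      exact pvRank_of_not_contains (by simpa using mem_seg hk)
    constructor
    · simp only [pvBuckets, List.flatMap_nil, List.nil_append]
      refine (seg_pairwise hnd _).imp_of_mem ?_
      intro a b ha hb hab
      exact pvLex_of_rank_eq (by rw [hrest a ha, hrest b hb]) hab
    · intro k hk
      simp only [pvBuckets, List.flatMap_nil, List.nil_append] at hk
      rw [hrest k hk]
      have : j ≤ 6 := by omega
      exact_mod_cast this
  | cons p s' ih =>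
    intro j hidx hle
    have hp : PySem.List.index? pvPreferred p = some j := by simpa using hidx 0 (by simp)
    have ih' := ih (j + 1)
      (fun i h => by
        have := hidx (i + 1) (by simpa using Nat.succ_lt_succ h)
        simpa [Nat.add_assoc, Nat.add_comm 1 i] using this)
      (by simp at hle ⊢; omega)
    have hseg : ∀ k ∈ PySem.List.sorted (ks.filter (fun k => pvBase k == p)) (fun k => k),
        pvRank k = (j : Int) := by
      intro k hk
      exact pvRank_of_idx (by simpa using mem_seg hk) hp
    have hbk : pvBuckets (p :: s') ks ++ pvRest ks
        = PySem.List.sorted (ks.filter (fun k => pvBase k == p)) (fun k => k)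
          ++ (pvBuckets s' ks ++ pvRest ks) := by
      simp [pvBuckets, List.flatMap_cons]
    rw [hbk]
    constructor
    · refine List.pairwise_append.mpr ⟨?_, ih'.1, ?_⟩
      · refine (seg_pairwise hnd _).imp_of_mem ?_
        intro a b ha hb hab
        exact pvLex_of_rank_eq (by rw [hseg a ha, hseg b hb]) hab
      · intro a ha b hb
        refine pvLex_of_rank_lt ?_
        have h1 := hseg a ha
        have h2 := ih'.2 b hb
        push_cast at h1 h2 ⊢
        omega
    · intro k hk
      rcases List.mem_append.mp hk with h | h
      · rw [hseg k h]
      · have := ih'.2 k h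
        push_cast at this ⊢
        omega

theorem filters_perm (base : String → String) : ∀ (P : List String), P.Nodup → ∀ ks : List String,
    ((P.flatMap fun p => ks.filter (fun k => base k == p)) ++ ks.filter (fun k => !(P.contains (base k)))).Perm ks := by
  intro P
  induction P with
  | nil => intro _ ks; simp
  | cons p P' ih =>
    intro hnd ks
    have hp : p ∉ P' := (List.nodup_cons.mp hnd).1
    have hP' := (List.nodup_cons.mp hnd).2
    simp only [List.flatMap_cons, List.append_assoc]
    have h1 : (P'.flatMap fun q => ks.filter (fun k => base k == q))
        = (P'.flatMap fun q => (ks.filter (fun k => !(base k == p))).filter (fun k => base k == q)) := by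
      apply List.flatMap_congr
      intro q hq
      rw [List.filter_filter]
      apply List.filter_congr
      intro k _
      by_cases h : base k = q
      · have hpq : p ≠ q := fun e => hp (e ▸ hq)
        simp [h]
        rintro rfl; exact hpq rfl
      · simp [h]
    have h2 : ks.filter (fun k => !((p :: P').contains (base k)))
        = (ks.filter (fun k => !(base k == p))).filter (fun k => !(P'.contains (base k))) := by
      rw [List.filter_filter]
      apply List.filter_congr
      intro k _
      by_cases h : base k = p
      · simp [h]
      · simp [h, BEq.comm]
        intro _ hpk; exact h hpk.symm
    rw [h1, h2]
    exact (List.Perm.append_left _ (ih hP' (ks.filter (fun k => !(base k == p))))).trans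
      (List.filter_append_perm _ ks)

theorem buckets_perm_filters (ks : List String) : ∀ P : List String,
    (pvBuckets P ks).Perm (P.flatMap fun p => ks.filter (fun k => pvBase k == p)) := by
  intro P
  induction P with
  | nil => simp [pvBuckets]
  | cons p P' ih =>
    simp only [pvBuckets, List.flatMap_cons] at *
    exact (PySem.List.sorted_perm _ _ _).append ih

theorem pv_main (ks : List String) (hnd : ks.Nodup) :
    PySem.List.sorted2 ks pvRank (fun k => k) = pvBuckets pvPreferred ks ++ pvRest ks := by
  rw [pv_sorted2_eq_sorted_lex]
  apply PySem.List.sorted_eq_of_perm_of_pairwise_lt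
  · refine ((buckets_perm_filters ks pvPreferred).append (PySem.List.sorted_perm _ _ _)).trans ?_
    exact filters_perm pvBase pvPreferred (by decide) ks
  · exact (tail_pairwise ks hnd pvPreferred 0 (by decide) (by decide)).1

-- ===== VERDICT (by name: the statement is the Claim_ definition above) =====
theorem render_counts_py_spec : Claim_equal_render_counts_py := by
  intro counts _
  unfold Spec_render_counts_py render_counts_py render_counts_py_alt
  have hnd : (PySem.Dict.ofList counts (κ := String) (ν := Int)).keys.Nodup :=
    PySem.Dict.nodup_keys_ofList counts
  simp only [PySem.List.foldl_append_eq_flatMap, pv_main _ hnd, pvBuckets, pvRest,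
    List.map_append, List.map_flatMap, List.nil_append]
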